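-- pv_equiv track=rewrite | github.com/harshkolte74-eng/python-loops-assignment | grade_analyzer.py | classify_grades
-- ===== SOURCE A (Python) =====
-- def classify_grades(averages):
--     # Defining thresholds inside the function (local variables)
--     top_grade = 90
--     passing_upper = 75
--     passing_lower = 60
--
--     results = {}
--     for name, avg in averages.items():
--         if avg >= top_grade:
--             grade = "A"
--         elif avg >= passing_upper:
--             grade = "B"
--         elif avg >= passing_lower:
--             grade = "C"
--         else:
--             grade = "F"
--         # Store both average and grade in a tuple
--         results[name] = (avg, grade)
--     return results
-- ===== SOURCE B (Python) =====
-- def classify_grades(averages):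
--     # Arithmetic table lookup: index = number of thresholds passed, grade = table[index].
--     grades = "FCBA"
--     return {name: (avg, grades[(avg >= 60) + (avg >= 75) + (avg >= 90)])
--             for name, avg in averages.items()}
-- ===== Notes on version B (the rewrite author's own statement) =====
-- stated objective: idiomatic
-- what changed: Replaces the if/elif comparison ladder and imperative accumulation with a dict comprehension that indexes a grade table 'FCBA' by the arithmetic count of thresholds passed.
import Mathlib
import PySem

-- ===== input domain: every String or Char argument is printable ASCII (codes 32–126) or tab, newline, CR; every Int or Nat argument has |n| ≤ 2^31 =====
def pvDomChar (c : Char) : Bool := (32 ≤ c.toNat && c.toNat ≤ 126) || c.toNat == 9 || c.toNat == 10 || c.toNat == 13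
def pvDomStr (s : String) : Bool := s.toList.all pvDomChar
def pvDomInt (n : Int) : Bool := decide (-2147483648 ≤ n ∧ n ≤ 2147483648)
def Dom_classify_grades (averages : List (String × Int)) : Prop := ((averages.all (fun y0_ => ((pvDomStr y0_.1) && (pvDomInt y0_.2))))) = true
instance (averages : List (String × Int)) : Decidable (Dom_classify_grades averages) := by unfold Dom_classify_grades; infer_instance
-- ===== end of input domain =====

-- B replaces A's if/elif ladder with a dict comprehension indexing the grade table "FCBA"
-- by the arithmetic count of thresholds passed (idiomatic; same O(n) cost).


-- ===== PORT A =====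
-- literal port: for name, avg in averages.items(): if/elif ladder; results[name] = (avg, grade)
def classify_grades (averages : List (String × Int)) : List (String × Int × String) :=
  (averages.foldl
    (fun (results : PySem.Dict String (Int × String)) p =>
      let grade : String :=
        if p.2 ≥ 90 then "A"
        else if p.2 ≥ 75 then "B"
        else if p.2 ≥ 60 then "C"
        else "F"
      results.insert p.1 (p.2, grade))
    PySem.Dict.empty).items

-- ===== PORT B =====
-- literal port of Source B: dict comprehension; grades[(avg>=60)+(avg>=75)+(avg>=90)].
-- The index is always 0..3, so Python's s[i] cannot raise; .getD "" is dead-code default.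
def classify_grades_alt (averages : List (String × Int)) : List (String × Int × String) :=
  (averages.foldl
    (fun (results : PySem.Dict String (Int × String)) p =>
      let i : Int := (if p.2 ≥ 60 then 1 else 0) + (if p.2 ≥ 75 then 1 else 0) + (if p.2 ≥ 90 then 1 else 0)
      -- grades[i]: Python 1-char string = String.ofList [c]; i is always 0..3 so never raises
      results.insert p.1 (p.2, ((PySem.Str.pyGet? "FCBA" i).map (fun c => String.ofList [c])).getD ""))
    PySem.Dict.empty).items

-- ===== PRECONDITION & SPEC =====
def Spec_classify_grades (averages : List (String × Int)) (out : List (String × Int × String)) : Prop := out = classify_grades_alt averages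
instance (averages : List (String × Int)) (out : List (String × Int × String)) : Decidable (Spec_classify_grades averages out) := by unfold Spec_classify_grades; infer_instance

-- ===== CLAIM (what is proved, stated in full; the proofs are below) =====
def Claim_equal_classify_grades : Prop := ∀ (averages : List (String × Int)), Dom_classify_grades averages → Spec_classify_grades averages (classify_grades averages)

-- ===== LEMMAS AND PROOFS =====
-- pointwise: the ladder grade equals the table lookup
theorem grade_eq (a : Int) :
    (if a ≥ 90 then "A" else if a ≥ 75 then "B" else if a ≥ 60 then "C" else "F")
    = ((PySem.Str.pyGet? "FCBA"
        ((if a ≥ 60 then (1:Int) else 0) + (if a ≥ 75 then 1 else 0) + (if a ≥ 90 then 1 else 0))).map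
          (fun c => String.ofList [c])).getD "" := by
  by_cases h90 : a ≥ 90
  · rw [if_pos h90, if_pos (show a ≥ 60 by omega), if_pos (show a ≥ 75 by omega), if_pos h90]
    decide
  · by_cases h75 : a ≥ 75
    · rw [if_neg h90, if_pos h75, if_pos (show a ≥ 60 by omega), if_pos h75, if_neg h90]
      decide
    · by_cases h60 : a ≥ 60
      · rw [if_neg h90, if_neg h75, if_pos h60, if_pos h60, if_neg h75, if_neg h90]
        decide
      · rw [if_neg h90, if_neg h75, if_neg h60, if_neg h60, if_neg h75, if_neg h90]
        decide

-- ===== VERDICT (by name: the statement is the Claim_ definition above) =====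
theorem classify_grades_spec : Claim_equal_classify_grades := by
  intro averages _
  unfold Spec_classify_grades classify_grades classify_grades_alt
  congr 2
  funext d p
  simp only []
  rw [grade_eq]
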